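-- pv_equiv track=rewrite | github.com/tonyeko/String-Matcher | string-matcher/bm.py | search
-- ===== SOURCE A (Python) =====
-- def buildLast(pattern):
--     last = [-1 for i in range(128)]
--     for i in range(len(pattern)):
--         last[ord(pattern[i].lower())] = i
--     return last
--
-- def search(text, pattern):
--     '''String matching Boyer Moore Algorithm modified, can search multiple pattern occurence in a text'''
--     last = buildLast(pattern)
--     idxText = idxPattern = len(pattern)-1
--     idxFound = []
--     while idxText < len(text):
--         if pattern[idxPattern].lower() == text[idxText].lower():
--             if idxPattern == 0:
--                 idxFound.append(idxText)
--                 idxText = idxText+2*len(pattern)-1 #geser text ke posisi string setelah matched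
--                 idxPattern = len(pattern)-1 #reset idxPattern
--             else:
--                 idxText-=1
--                 idxPattern-=1
--         else:
--             lastOcc = last[ord(text[idxText].lower())]
--             idxText += len(pattern)-min(idxPattern, 1+lastOcc)
--             idxPattern = len(pattern)-1
--     return idxFound
-- ===== SOURCE B (Python) =====
-- def search(text, pattern):
--     '''Case-insensitive search for all non-overlapping occurrences of pattern,
--     left to right, returning the list of match start indices.'''
--     if not pattern:
--         return []
--     t, p, m = text.lower(), pattern.lower(), len(pattern)
--     res, k = [], 0
--     while True:
--         i = t.find(p, k)
--         if i == -1: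
--             return res
--         res.append(i)
--         k = i + m
--     return res
-- ===== Notes on version B (the rewrite author's own statement) =====
-- stated objective: faster
-- what changed: Replaces the hand-written Boyer-Moore right-to-left scan with last-occurrence shift table by lowering both strings once and repeatedly calling str.find (CPython's two-way search) to jump straight to the next occurrence, collecting non-overlapping starts left to right.
import Mathlib
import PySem

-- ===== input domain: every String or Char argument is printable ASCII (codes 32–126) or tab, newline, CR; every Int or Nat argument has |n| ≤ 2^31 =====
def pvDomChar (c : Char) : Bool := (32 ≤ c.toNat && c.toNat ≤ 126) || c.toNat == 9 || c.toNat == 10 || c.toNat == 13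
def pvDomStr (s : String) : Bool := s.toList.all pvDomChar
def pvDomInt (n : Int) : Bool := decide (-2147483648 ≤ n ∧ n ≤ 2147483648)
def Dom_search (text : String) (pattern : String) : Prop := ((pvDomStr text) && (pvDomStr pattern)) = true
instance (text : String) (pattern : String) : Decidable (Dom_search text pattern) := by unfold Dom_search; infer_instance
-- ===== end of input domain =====

-- B replaces A's hand-written Boyer-Moore scan by lowering both strings once and
-- jumping from occurrence to occurrence with str.find (objective: faster).

-- ===== PORT A =====
-- last = [-1]*128; for i in range(len(pattern)): last[ord(pattern[i].lower())] = i
-- (List.set is a no-op where Python's assignment would raise IndexError on a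
--  code point ≥ 128; such characters lie outside Dom_search)
def buildLast (pattern : List Char) : List Int :=
  (PySem.List.pyRange 0 pattern.length 1).foldl
    (fun last i =>
      match PySem.List.pyGet? pattern i with
      | some c => last.set (PySem.Chars.lowerChar c).toNat i
      | none => last)
    (List.replicate 128 (-1))

-- arithmetic facts used only to justify termination of the loop below (cited by name there)
lemma measure_toNat_lt (N s1 s2 : Int) (h1 : s2 < s1) (h2 : s2 < N) :
    (N - s1).toNat < (N - s2).toNat := by
  exact (Int.toNat_lt_toNat (by omega)).mpr (by omega)

lemma searchLoop_dec1 (n m : Nat) (idxText : Int) (j : Nat) (hg : idxText < (n : Int))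
    (hp : 0 < m) (hj : j = 0) :
    Prod.Lex (· < ·) (· < ·)
      (((n : Int) - (idxText + 2 * (m : Int) - 1 - ((m - 1 : Nat) : Int))).toNat, m - 1)
      (((n : Int) - (idxText - (j : Int))).toNat, j) := by
  subst hj
  apply Prod.Lex.left
  apply measure_toNat_lt
  · have : ((m - 1 : Nat) : Int) = (m : Int) - 1 := Int.ofNat_sub hp
    omega
  · omega

lemma searchLoop_dec2 (n m : Nat) (idxText : Int) (j : Nat) (hg : idxText < (n : Int))
    (hp : 0 < m) (hj : ¬ j = 0) :
    Prod.Lex (· < ·) (· < ·)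
      (((n : Int) - (idxText - 1 - ((j - 1 : Nat) : Int))).toNat, j - 1)
      (((n : Int) - (idxText - (j : Int))).toNat, j) := by
  have harg : idxText - 1 - ((j - 1 : Nat) : Int) = idxText - (j : Int) := by
    have : ((j - 1 : Nat) : Int) = (j : Int) - 1 :=
      Int.ofNat_sub (Nat.one_le_iff_ne_zero.mpr hj)
    omega
  rw [harg]
  exact Prod.Lex.right _ (Nat.sub_lt (Nat.pos_of_ne_zero hj) one_pos)

lemma searchLoop_dec3 (n m : Nat) (idxText : Int) (j : Nat) (lastOcc : Int)
    (hg : idxText < (n : Int)) (hp : 0 < m) :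
    Prod.Lex (· < ·) (· < ·)
      (((n : Int) - (idxText + (m : Int) - min (j : Int) (1 + lastOcc)
        - ((m - 1 : Nat) : Int))).toNat, m - 1)
      (((n : Int) - (idxText - (j : Int))).toNat, j) := by
  apply Prod.Lex.left
  apply measure_toNat_lt
  · have h1 : min (j : Int) (1 + lastOcc) ≤ (j : Int) := min_le_left _ _
    have h2 : ((m - 1 : Nat) : Int) = (m : Int) - 1 := Int.ofNat_sub hp
    generalize min (j : Int) (1 + lastOcc) = q at h1 ⊢
    omega
  · omega

-- the while loop of A; idxPattern is kept as a Nat (its Python value is never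
-- negative on inputs where A returns).  Each `none` lookup marks a spot where the
-- Python raises IndexError (empty pattern, or a code point ≥ 128: outside Pre_/Dom).
def searchLoop (t p : List Char) (tbl : List Int)
    (idxText : Int) (j : Nat) (acc : List Int) : List Int :=
  if hg : idxText < (t.length : Int) then
    match h1 : PySem.List.pyGet? p (j : Int), h2 : PySem.List.pyGet? t idxText with
    | some pc, some tc =>
      if hc : PySem.Chars.lowerChar pc = PySem.Chars.lowerChar tc then
        if hj : j = 0 then
          searchLoop t p tbl (idxText + 2 * (p.length : Int) - 1) (p.length - 1)
            (acc ++ [idxText])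
        else
          searchLoop t p tbl (idxText - 1) (j - 1) acc
      else
        match PySem.List.pyGet? tbl ((PySem.Chars.lowerChar tc).toNat : Int) with
        | some lastOcc =>
            searchLoop t p tbl (idxText + (p.length : Int) - min (j : Int) (1 + lastOcc))
              (p.length - 1) acc
        | none => acc
    | _, _ => acc
  else acc
  termination_by ((t.length - (idxText - j)).toNat, j)
  decreasing_by
  all_goals have hp : 0 < p.length := List.length_pos_of_ne_nil (by
      intro hP; subst hP; simpa using PySem.List.mem_of_pyGet?_eq_some _ h1)
  · exact searchLoop_dec1 t.length p.length idxText j hg hp hj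
  · exact searchLoop_dec2 t.length p.length idxText j hg hp hj
  · exact searchLoop_dec3 t.length p.length idxText j lastOcc hg hp

def search (text : String) (pattern : String) : List Int :=
  let last := buildLast pattern.toList
  searchLoop text.toList pattern.toList last ((pattern.toList.length : Int) - 1)
    (pattern.toList.length - 1) []

-- ===== PORT B =====
-- while True: i = t.find(p, k); if i == -1: return res; res.append(i); k = i + m
-- (k is a Nat: it is 0 or a match end; the hp/hk proof arguments only justify
--  termination, the computation is Source B's)
-- facts used only to justify termination of the loop below (cited by name there)
lemma searchAltLoop_bound (t p : List Char) (hp : p ≠ []) (k : Nat) (hk : k ≤ t.length)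
    (h : ¬ PySem.Chars.findFrom t p (k : Int) none = -1) :
    (PySem.Chars.findFrom t p (k : Int) none).toNat + p.length ≤ t.length := by
  have hspec := PySem.Chars.findFrom_natCast_spec t p k hk h
  have hm : 0 < p.length := List.length_pos_of_ne_nil hp
  have h2 := hspec.2.1.length_le
  rw [List.length_drop] at h2
  generalize (PySem.Chars.findFrom t p (k : Int) none).toNat = iN at h2 ⊢
  omega

lemma searchAltLoop_dec (t p : List Char) (hp : p ≠ []) (k : Nat) (hk : k ≤ t.length)
    (h : ¬ PySem.Chars.findFrom t p (k : Int) none = -1) :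
    t.length - ((PySem.Chars.findFrom t p (k : Int) none).toNat + p.length) < t.length - k := by
  have hb := searchAltLoop_bound t p hp k hk h
  have hp' : 0 < p.length := List.length_pos_of_ne_nil hp
  have hsp := (PySem.Chars.findFrom_natCast_spec t p k hk h).1
  have h1 : k ≤ (PySem.Chars.findFrom t p (k : Int) none).toNat :=
    (Int.le_toNat (le_trans (Int.natCast_nonneg k) hsp)).mpr hsp
  generalize (PySem.Chars.findFrom t p (k : Int) none).toNat = iN at hb h1 ⊢
  exact Nat.sub_lt_sub_left (by omega) (by omega)

def searchAltLoop (t p : List Char) (hp : p ≠ [])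
    (k : Nat) (hk : k ≤ t.length) (res : List Int) : List Int :=
  if h : PySem.Chars.findFrom t p (k : Int) none = -1 then res
  else
    searchAltLoop t p hp ((PySem.Chars.findFrom t p (k : Int) none).toNat + p.length)
      (searchAltLoop_bound t p hp k hk h)
      (res ++ [PySem.Chars.findFrom t p (k : Int) none])
  termination_by t.length - k
  decreasing_by exact searchAltLoop_dec t p hp k hk h

def search_alt (text : String) (pattern : String) : List Int :=
  if hp : pattern.toList = [] then []
  else
    let t := PySem.Chars.lower text.toList
    let p := PySem.Chars.lower pattern.toList
    searchAltLoop t p (by simp [PySem.Chars.lower, p, hp]) 0 (Nat.zero_le _) []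

-- ===== PRECONDITION & SPEC =====
-- Pre_ excludes exactly the empty pattern: there A evaluates pattern[-1] and
-- raises IndexError for every text (B naturally returns []).
def Pre_search (text : String) (pattern : String) : Prop := pattern ≠ ""
instance (text : String) (pattern : String) : Decidable (Pre_search text pattern) := by
  unfold Pre_search; infer_instance

def pvWitness_search : String × String := ("abcABC", "bc")

def Spec_search (text : String) (pattern : String) (out : List Int) : Prop :=
  out = search_alt text pattern
instance (text : String) (pattern : String) (out : List Int) : Decidable (Spec_search text pattern out) := by
  unfold Spec_search; infer_instance

-- ===== CLAIM (what is proved, stated in full; the proofs are below) =====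
def Claim_equal_search : Prop := ∀ (text : String) (pattern : String),
  Dom_search text pattern → Pre_search text pattern → Spec_search text pattern (search text pattern)

-- ===== LEMMAS AND PROOFS =====

-- the common reference: greedy left-to-right non-overlapping matches of p in t
-- (both lists already lowered), starting at index i
def greedy (t p : List Char) (i : Nat) : List Int :=
  if h : i + p.length ≤ t.length ∧ 0 < p.length then
    if p <+: t.drop i then (i : Int) :: greedy t p (i + p.length)
    else greedy t p (i + 1)
  else []
  termination_by t.length - i
  decreasing_by all_goals omega

lemma greedy_congr (t p : List Char) (i i' : Nat) (hle : i ≤ i')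
    (hno : ∀ u, i ≤ u → u < i' → ¬ p <+: t.drop u) :
    greedy t p i = greedy t p i' := by
  obtain ⟨d, rfl⟩ := Nat.exists_eq_add_of_le hle
  clear hle
  induction d generalizing i with
  | zero => rfl
  | succ d ih =>
    have hstep : greedy t p i = greedy t p (i + 1) := by
      rw [greedy]
      split
      · next h =>
        rw [if_neg (hno i le_rfl (by omega))]
      · next h =>
        rw [greedy]
        rw [dif_neg (by omega)]
    rw [hstep]
    have heq : i + (d + 1) = (i + 1) + d := by omega
    rw [heq]
    exact ih (i + 1) (fun u hu hu' => hno u (by omega) (by omega))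

lemma greedy_nil (t p : List Char) (i : Nat)
    (hno : ∀ u, i ≤ u → ¬ p <+: t.drop u) :
    greedy t p i = [] := by
  have h1 : greedy t p i = greedy t p (max i t.length) :=
    greedy_congr t p i _ (le_max_left _ _) (fun u hu _ => hno u hu)
  rw [h1, greedy, dif_neg]
  intro h
  omega

lemma greedy_match (t p : List Char) (i : Nat) (hp : 0 < p.length)
    (hm : p <+: t.drop i) :
    greedy t p i = (i : Int) :: greedy t p (i + p.length) := by
  have hlen := hm.length_le
  rw [List.length_drop] at hlen
  rw [greedy, dif_pos (by omega), if_pos hm]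

lemma char_le_toNat {a b : Char} (h : a ≤ b) : a.toNat ≤ b.toNat := h

lemma lowerChar_lt_128 (c : Char) (h : pvDomChar c = true) :
    (PySem.Chars.lowerChar c).toNat < 128 := by
  have hc : c.toNat < 128 := by
    simp only [pvDomChar, Bool.or_eq_true, Bool.and_eq_true, decide_eq_true_eq,
      beq_iff_eq] at h
    omega
  unfold PySem.Chars.lowerChar PySem.Chars.isupper
  split
  · next hU =>
    simp only [Bool.and_eq_true, decide_eq_true_eq] at hU
    have h1 : ('A' : Char).toNat ≤ c.toNat := char_le_toNat hU.1
    have h2 : c.toNat ≤ ('Z' : Char).toNat := char_le_toNat hU.2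
    have hA : ('A' : Char).toNat = 65 := rfl
    have hZ : ('Z' : Char).toNat = 90 := rfl
    rw [Char.toNat_ofNat]
    have hv : (c.toNat + 32).isValidChar := by
      left
      omega
    simp only [hv, if_true]
    omega
  · exact hc

lemma getD_lb (l : List Int) (h : ∀ x ∈ l, -1 ≤ x) (c : Nat) : -1 ≤ l.getD c (-1) := by
  rw [List.getD_eq_getElem?_getD]
  cases hx : l[c]? with
  | none => simp
  | some x => simpa using h x (List.mem_of_getElem? hx)

lemma buildLast_aux (p : List Char) (q : Nat) (hq : q ≤ p.length) :
    ((PySem.List.pyRange 0 q 1).foldl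
      (fun last i =>
        match PySem.List.pyGet? p i with
        | some c => last.set (PySem.Chars.lowerChar c).toNat i
        | none => last)
      (List.replicate 128 (-1))).length = 128 ∧
    (∀ x ∈ ((PySem.List.pyRange 0 q 1).foldl
      (fun last i =>
        match PySem.List.pyGet? p i with
        | some c => last.set (PySem.Chars.lowerChar c).toNat i
        | none => last)
      (List.replicate 128 (-1))), -1 ≤ x) ∧
    (∀ k : Nat, k < q → ∀ (hk : k < p.length), (PySem.Chars.lowerChar p[k]).toNat < 128 →
      (k : Int) ≤ ((PySem.List.pyRange 0 q 1).foldl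
      (fun last i =>
        match PySem.List.pyGet? p i with
        | some c => last.set (PySem.Chars.lowerChar c).toNat i
        | none => last)
      (List.replicate 128 (-1))).getD (PySem.Chars.lowerChar p[k]).toNat (-1)) := by
  induction q with
  | zero =>
    refine ⟨by simp [PySem.List.pyRange_one_eq_nil], ?_, by omega⟩
    intro x hx
    simp [PySem.List.pyRange_one_eq_nil] at hx
    omega
  | succ q ih =>
    obtain ⟨ihlen, ihlb, ihval⟩ := ih (by omega)
    have hsplit : PySem.List.pyRange 0 (q + 1 : Nat) 1
        = PySem.List.pyRange 0 q 1 ++ [(q : Int)] := by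
      have := PySem.List.pyRange_one_succ_right (a := 0) (b := (q : Int)) (by omega)
      simpa using this
    rw [hsplit, List.foldl_append]
    simp only [List.foldl_cons, List.foldl_nil]
    rw [PySem.List.pyGet?_ofNat p q (by omega)]
    dsimp only
    set tbl := (PySem.List.pyRange 0 q 1).foldl
      (fun last i =>
        match PySem.List.pyGet? p i with
        | some c => last.set (PySem.Chars.lowerChar c).toNat i
        | none => last)
      (List.replicate 128 (-1)) with htbl
    refine ⟨by simpa using ihlen, fun x hx => ?_, fun k hk hk' hcode => ?_⟩
    · rcases List.mem_or_eq_of_mem_set hx with h | h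
      · exact ihlb x h
      · subst h; omega
    · rw [List.getD_eq_getElem?_getD, List.getElem?_set]
      split
      · next heq =>
        split
        · next =>
          simp only [Option.getD_some]
          omega
        · next hlt =>
          exact absurd (show (PySem.Chars.lowerChar p[q]).toNat < tbl.length by omega) hlt
      · next hne =>
        rw [← List.getD_eq_getElem?_getD]
        have hkq : k < q := by
          rcases Nat.lt_or_ge k q with h | h
          · exact h
          · have hkq' : k = q := by omega
            subst hkq'
            exact absurd rfl hne
        exact ihval k hkq hk' hcode

lemma buildLast_spec (p : List Char) :
    (buildLast p).length = 128 ∧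
    (∀ c : Nat, -1 ≤ (buildLast p).getD c (-1)) ∧
    (∀ k : Nat, (hk : k < p.length) → (PySem.Chars.lowerChar p[k]).toNat < 128 →
      (k : Int) ≤ (buildLast p).getD (PySem.Chars.lowerChar p[k]).toNat (-1)) := by
  obtain ⟨h1, h2, h3⟩ := buildLast_aux p p.length le_rfl
  exact ⟨h1, fun c => getD_lb _ h2 c, fun k hk hc => h3 k hk hk hc⟩

lemma no_match_of_not_infix (t p : List Char) (k : Nat)
    (h : ¬ p <:+: t.drop k) : ∀ u, k ≤ u → ¬ p <+: t.drop u := by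
  intro u hu hpre
  apply h
  have : t.drop u = (t.drop k).drop (u - k) := by
    rw [List.drop_drop]
    congr 1
    omega
  rw [this] at hpre
  exact hpre.isInfix.trans (List.drop_suffix _ _).isInfix

lemma searchAltLoop_eq (t p : List Char) (hp : p ≠ [])
    (k : Nat) (hk : k ≤ t.length) (res : List Int) :
    searchAltLoop t p hp k hk res = res ++ greedy t p k := by
  induction k, hk, res using searchAltLoop.induct t p hp with
  | case1 k hk res h =>
    rw [searchAltLoop, dif_pos h]
    rw [greedy_nil t p k (no_match_of_not_infix t p k
      ((PySem.Chars.findFrom_natCast_eq_neg_one_iff t p k hk).mp h))]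
    simp
  | case2 k hk res h ih =>
    have hspec := PySem.Chars.findFrom_natCast_spec t p k hk h
    rw [searchAltLoop, dif_neg h]
    rw [ih]
    have hp' : 0 < p.length := List.length_pos_of_ne_nil hp
    have h0 : (0 : Int) ≤ PySem.Chars.findFrom t p (k : Int) none := by
      have := hspec.1; omega
    have hcongr : greedy t p k
        = greedy t p (PySem.Chars.findFrom t p (k : Int) none).toNat := by
      apply greedy_congr t p _ _ (by have := hspec.1; omega)
      intro u hu hu'
      exact hspec.2.2 u hu hu'
    rw [hcongr, greedy_match t p _ hp' hspec.2.1]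
    simp only [List.append_assoc, List.cons_append, List.nil_append]
    congr 2
    omega

lemma lower_length (cs : List Char) : (PySem.Chars.lower cs).length = cs.length := by
  simp [PySem.Chars.lower]

lemma lower_getElem (cs : List Char) (k : Nat) (hk : k < cs.length) :
    (PySem.Chars.lower cs)[k]'(by simpa [lower_length] using hk)
      = PySem.Chars.lowerChar cs[k] := by
  simp [PySem.Chars.lower]

lemma searchLoop_eq (t p : List Char) (hp : 0 < p.length)
    (hascii : ∀ c ∈ t, (PySem.Chars.lowerChar c).toNat < 128)
    (idxText : Int) (j : Nat) (acc : List Int)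
    (hj : j < p.length)
    (hs : (j : Int) ≤ idxText)
    (hmatch : (PySem.Chars.lower p).drop (j + 1) <+:
              (PySem.Chars.lower t).drop ((idxText + 1).toNat)) :
    searchLoop t p (buildLast p) idxText j acc
      = acc ++ greedy (PySem.Chars.lower t) (PySem.Chars.lower p) ((idxText - j).toNat) := by
  revert hj hs hmatch
  induction idxText, j, acc using searchLoop.induct t p (buildLast p) with
  | case1 idxText acc hg pc tc h2 hc h1 ih =>
    intro hj hs hmatch
    -- pc = p[0], tc = t[idxText.toNat]
    have hpc : pc = p[0] := by
      rw [PySem.List.pyGet?_ofNat p 0 hj] at h1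
      exact (Option.some_inj.mp h1).symm
    have htc : tc = t[idxText.toNat] := by
      rw [PySem.List.pyGet?_eq_some_getElem t hs hg] at h2
      exact (Option.some_inj.mp h2).symm
    have hsn : idxText.toNat < (PySem.Chars.lower t).length := by
      rw [lower_length]; omega
    have hfull : PySem.Chars.lower p <+:
        (PySem.Chars.lower t).drop (idxText.toNat) := by
      rw [List.drop_eq_getElem_cons hsn]
      have hdp : PySem.Chars.lower p
          = (PySem.Chars.lower p)[0]'(by rw [lower_length]; omega)
            :: (PySem.Chars.lower p).drop 1 := by
        conv_lhs => rw [← List.drop_zero (l := PySem.Chars.lower p)]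
        exact List.drop_eq_getElem_cons (by rw [lower_length]; omega)
      rw [hdp]
      rw [List.cons_prefix_cons]
      constructor
      · rw [lower_getElem p 0 hj, lower_getElem t idxText.toNat (by omega), ← hpc, ← htc]
        exact hc
      · have : (idxText + 1).toNat = idxText.toNat + 1 := by omega
        rw [this] at hmatch
        simpa using hmatch
    rw [searchLoop, dif_pos hg, h1, h2]
    simp only [dif_pos hc, dif_pos rfl, dite_true]
    rw [ih (by omega) (by push_cast; omega) (by
        rw [List.drop_eq_nil_of_le (by rw [lower_length]; omega)]
        exact List.nil_prefix)]
    have hs0 : (idxText - ((0 : Nat) : Int)).toNat = idxText.toNat := by omega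
    have hX : (idxText + 2 * (p.length : Int) - 1 - ((p.length - 1 : Nat) : Int)).toNat
        = idxText.toNat + (PySem.Chars.lower p).length := by
      rw [lower_length]; omega
    rw [hs0, hX]
    rw [greedy_match _ _ _ (by rw [lower_length]; omega) hfull]
    have hidx : ((idxText.toNat : Nat) : Int) = idxText := by omega
    rw [hidx]
    simp
  | case2 idxText j acc hg pc tc h1 h2 hc hj0 ih =>
    intro hj hs hmatch
    have hpc : pc = p[j] := by
      rw [PySem.List.pyGet?_ofNat p j hj] at h1
      exact (Option.some_inj.mp h1).symm
    have htc : tc = t[idxText.toNat] := by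
      rw [PySem.List.pyGet?_eq_some_getElem t (by omega) hg] at h2
      exact (Option.some_inj.mp h2).symm
    rw [searchLoop, dif_pos hg, h1, h2]
    simp only [dif_pos hc, dif_neg hj0]
    rw [ih (by omega) (by push_cast; omega) (by
        have h11 : (idxText - 1 + 1).toNat = idxText.toNat := by omega
        rw [h11]
        have hdj : (PySem.Chars.lower p).drop (j - 1 + 1)
            = (PySem.Chars.lower p)[j]'(by rw [lower_length]; omega)
              :: (PySem.Chars.lower p).drop (j + 1) := by
          have : j - 1 + 1 = j := by omega
          rw [this]
          exact List.drop_eq_getElem_cons (by rw [lower_length]; omega)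
        rw [hdj, List.drop_eq_getElem_cons (show idxText.toNat < (PySem.Chars.lower t).length
          by rw [lower_length]; omega)]
        rw [List.cons_prefix_cons]
        constructor
        · rw [lower_getElem p j hj, lower_getElem t idxText.toNat (by omega), ← hpc, ← htc]
          exact hc
        · have : (idxText + 1).toNat = idxText.toNat + 1 := by omega
          rw [this] at hmatch
          exact hmatch)]
    have harg : (idxText - 1 - ((j - 1 : Nat) : Int)).toNat = (idxText - j).toNat := by omega
    rw [harg]
  | case3 idxText j acc hg pc tc h1 h2 hc lastOcc h3 ih =>
    intro hj hs hmatch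
    have hpc : pc = p[j] := by
      rw [PySem.List.pyGet?_ofNat p j hj] at h1
      exact (Option.some_inj.mp h1).symm
    have htc : tc = t[idxText.toNat] := by
      rw [PySem.List.pyGet?_eq_some_getElem t (by omega) hg] at h2
      exact (Option.some_inj.mp h2).symm
    obtain ⟨hlen, hlb, hval⟩ := buildLast_spec p
    have hcode : (PySem.Chars.lowerChar tc).toNat < 128 := by
      apply hascii
      rw [htc]
      exact List.getElem_mem _
    have hlo : lastOcc = (buildLast p).getD (PySem.Chars.lowerChar tc).toNat (-1) := by
      rw [PySem.List.pyGet?_ofNat (buildLast p) _ (by omega)] at h3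
      rw [List.getD_eq_getElem _ _ (by omega)]
      exact (Option.some_inj.mp h3).symm
    have hlb' : -1 ≤ lastOcc := by rw [hlo]; exact hlb _
    rw [searchLoop, dif_pos hg, h1, h2]
    simp only [dif_neg hc, h3]
    rw [ih (by omega) (by push_cast; omega) (by
        rw [List.drop_eq_nil_of_le (by rw [lower_length]; omega)]
        exact List.nil_prefix)]
    -- greedy congr: no match in [s, s'')
    have hno : ∀ u, (idxText - j).toNat ≤ u →
        u < (idxText + 1 - min (j : Int) (1 + lastOcc)).toNat →
        ¬ PySem.Chars.lower p <+: (PySem.Chars.lower t).drop u := by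
      intro u hu hu' hpre
      have hmin0 : 0 ≤ min (j : Int) (1 + lastOcc) := by omega
      have huI : (u : Int) ≤ idxText := by omega
      set kk : Nat := idxText.toNat - u with hkk
      have hkkj : kk ≤ j := by omega
      have hkkm : kk < p.length := by omega
      have hchar : PySem.Chars.lowerChar p[kk] = PySem.Chars.lowerChar tc := by
        have hkk' : kk < (PySem.Chars.lower p).length := by rw [lower_length]; omega
        have h4 := hpre.getElem hkk'
        rw [List.getElem_drop] at h4
        have h5 : u + kk = idxText.toNat := by omega
        rw [lower_getElem p kk hkkm] at h4
        have h6 : (PySem.Chars.lower t)[u + kk]'(by rw [lower_length]; omega)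
            = PySem.Chars.lowerChar tc := by
          rw [htc]
          rw [lower_getElem t (u + kk) (by omega)]
          have h5' : u + kk = idxText.toNat := by omega
          simp only [h5']
        rw [h6] at h4
        exact h4
      by_cases hmin : (j : Int) ≤ 1 + lastOcc
      · -- min = j, so u = s and kk = j: contradicts the mismatch
        have hkkj' : kk = j := by omega
        simp only [hkkj'] at hchar
        rw [← hpc] at hchar
        exact hc hchar
      · -- min = 1 + lastOcc < j: contradicts the last-occurrence table
        have hkgt : (kk : Int) > lastOcc := by omega
        have := hval kk hkkm (by rw [hchar]; exact hcode)
        rw [hchar, ← hlo] at this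
        omega
    have hcongr := greedy_congr (PySem.Chars.lower t) (PySem.Chars.lower p)
      ((idxText - j).toNat) ((idxText + 1 - min (j : Int) (1 + lastOcc)).toNat)
      (by omega) hno
    have harg : (idxText + (p.length : Int) - min (j : Int) (1 + lastOcc)
        - ((p.length - 1 : Nat) : Int)).toNat
        = (idxText + 1 - min (j : Int) (1 + lastOcc)).toNat := by omega
    rw [harg, ← hcongr]
  | case4 idxText j acc hg pc tc h1 h2 hc h3 =>
    intro hj hs hmatch
    exfalso
    have hcode : (PySem.Chars.lowerChar tc).toNat < 128 := by
      apply hascii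
      have htc : tc = t[idxText.toNat] := by
        rw [PySem.List.pyGet?_eq_some_getElem t (by omega) hg] at h2
        exact (Option.some_inj.mp h2).symm
      rw [htc]
      exact List.getElem_mem _
    obtain ⟨hlen, hlb, hval⟩ := buildLast_spec p
    rw [PySem.List.pyGet?_ofNat (buildLast p) _ (by omega)] at h3
    simp at h3
  | case5 idxText j acc hg hnone =>
    intro hj hs hmatch
    exfalso
    exact hnone p[j] t[idxText.toNat]
      (PySem.List.pyGet?_ofNat p j hj)
      (PySem.List.pyGet?_eq_some_getElem t (by omega) hg)
  | case6 idxText j acc hg =>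
    intro hj hs hmatch
    rw [searchLoop, dif_neg hg, greedy, dif_neg (by
      rw [lower_length, lower_length]
      intro hcon
      omega)]
    simp


-- ===== VERDICT (by name: the statement is the Claim_ definition above) =====
theorem search_spec : Claim_equal_search := by
  intro text pattern hdom hpre
  unfold Spec_search
  have hplist : pattern.toList ≠ [] := fun h => hpre (String.toList_eq_nil_iff.mp h)
  have hp : 0 < pattern.toList.length := List.length_pos_of_ne_nil hplist
  have hdt : pvDomStr text = true := by
    unfold Dom_search at hdom
    exact (Bool.and_eq_true _ _ |>.mp hdom).1
  have hascii : ∀ c ∈ text.toList, (PySem.Chars.lowerChar c).toNat < 128 := by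
    intro c hc
    apply lowerChar_lt_128
    unfold pvDomStr at hdt
    exact List.all_eq_true.mp hdt c hc
  show searchLoop text.toList pattern.toList (buildLast pattern.toList)
      ((pattern.toList.length : Int) - 1) (pattern.toList.length - 1) []
    = search_alt text pattern
  rw [searchLoop_eq text.toList pattern.toList hp hascii _ _ [] (by omega)
    (by push_cast; omega)
    (by
      rw [List.drop_eq_nil_of_le (by rw [lower_length]; omega)]
      exact List.nil_prefix)]
  rw [show ((pattern.toList.length : Int) - 1 - ((pattern.toList.length - 1 : Nat) : Int)).toNat
      = 0 by omega]
  show [] ++ greedy (PySem.Chars.lower text.toList) (PySem.Chars.lower pattern.toList) 0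
    = search_alt text pattern
  unfold search_alt
  rw [dif_neg hplist]
  rw [searchAltLoop_eq]
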